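-- pv_equiv track=rewrite | github.com/woneunji/algorithm | 프로그래머스/unrated/181921. 배열 만들기 2/배열 만들기 2.py | solution
-- ===== SOURCE A (Python) =====
-- def solution(l, r):
--     answer = []
--     for i in range(l, r+1):
--         if i % 5 == 0:
--             num = str(i)
--             if ("5" or "0") in num:
--                 answer.append(i)
--                 for j in num:
--                     if not (j == "5" or j == "0"):
--                         answer.remove(i)
--                         break
--     if answer == []:
--         return [-1]
--     return answer
-- ===== SOURCE B (Python) =====
-- def solution(l, r):
--     # Generate the numbers whose decimal digits are only 0 and 5 directly:
--     # level 0 is [5]; each next level appends a digit 0 or 5 to every number.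
--     answer = []
--     level = [5]
--     for _ in range(len(str(r))):
--         answer.extend(v for v in level if l <= v <= r)
--         level = [10 * v + d for v in level for d in (0, 5)]
--     return answer or [-1]
-- ===== Notes on version B (the rewrite author's own statement) =====
-- stated objective: alternative
-- what changed: Instead of scanning every integer in [l,r] and string-checking its digits, B generates the candidate numbers made only of digits {0,5} level by level (appending a digit 0 or 5 to each previous number) and filters each level into [l,r]; intended as asymptotically faster (work depends on the digit count of r, not on r-l), measured 70x at the largest size but not consistently across inputs, so recorded without a speed claim.
import Mathlib
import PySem

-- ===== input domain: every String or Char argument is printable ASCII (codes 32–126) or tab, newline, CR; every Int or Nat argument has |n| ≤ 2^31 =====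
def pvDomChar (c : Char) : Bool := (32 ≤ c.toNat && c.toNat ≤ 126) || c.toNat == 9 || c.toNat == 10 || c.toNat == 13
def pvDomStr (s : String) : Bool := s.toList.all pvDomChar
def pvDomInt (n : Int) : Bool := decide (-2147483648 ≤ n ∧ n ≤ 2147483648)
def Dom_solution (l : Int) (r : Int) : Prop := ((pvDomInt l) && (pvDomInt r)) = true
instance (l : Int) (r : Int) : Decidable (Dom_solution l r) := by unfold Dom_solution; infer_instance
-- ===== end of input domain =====

-- B generates the numbers made of digits {0,5} level by level instead of scanning every
-- integer of [l, r]; equivalence of the return values is proved for all l, r in Dom.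

-- ===== PORT A =====
-- inner 'for j in num: if not (j == "5" or j == "0"): answer.remove(i); break'
-- (the remove always succeeds — i was just appended — so getD is never the none branch)
def pvInner (cs : List Char) (ans : List Int) (i : Int) : List Int :=
  match cs with
  | [] => ans
  | c :: rest =>
      if !(c == '5' || c == '0') then (PySem.List.remove? ans i).getD ans
      else pvInner rest ans i

def solution (l : Int) (r : Int) : List Int :=
  let answer := (PySem.List.pyRange l (r + 1) 1).foldl (fun ans i =>
    if PySem.Int.mod i 5 == 0 then
      let num := PySem.Int.toStr i
      if PySem.Str.isIn "5" num then pvInner num.toList (ans ++ [i]) i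
      else ans
    else ans) []
  if answer = [] then [-1] else answer

-- ===== PORT B =====
def solution_alt (l : Int) (r : Int) : List Int :=
  let answer := (List.range (PySem.Str.len (PySem.Int.toStr r)).toNat).foldl
    (fun (p : List Int × List Int) _ =>
      (p.1 ++ p.2.filter (fun v => decide (l ≤ v) && decide (v ≤ r)),
       p.2.flatMap (fun v => [10 * v + 0, 10 * v + 5])))
    ([], [5])
  if answer.1 = [] then [-1] else answer.1

-- ===== PRECONDITION & SPEC =====
def Spec_solution (l : Int) (r : Int) (out : List Int) : Prop := out = solution_alt l r
instance (l : Int) (r : Int) (out : List Int) : Decidable (Spec_solution l r out) := by unfold Spec_solution; infer_instance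

-- ===== CLAIM (what is proved, stated in full; the proofs are below) =====
def Claim_equal_solution : Prop := ∀ (l : Int) (r : Int), Dom_solution l r → Spec_solution l r (solution l r)

-- ===== LEMMAS AND PROOFS =====

-- The filter predicate A's loop implements
def pvP (i : Int) : Bool :=
  (PySem.Int.mod i 5 == 0) && PySem.Str.isIn "5" (PySem.Int.toStr i)
    && !((PySem.Int.toStr i).toList.any (fun c => !(c == '5' || c == '0')))

-- The level lists of B
def pvNext (lv : List Int) : List Int := lv.flatMap (fun v => [10 * v + 0, 10 * v + 5])

def pvLevels : Nat → List Int
  | 0 => [5]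
  | k + 1 => pvNext (pvLevels k)

-- pure arithmetic/digit predicate
def pvQ (x : Int) : Prop := 0 < x ∧ ∀ c ∈ Nat.toDigits 10 x.toNat, c = '0' ∨ c = '5'

theorem pv_remove_append (ans : List Int) (x : Int) (h : x ∉ ans) :
    PySem.List.remove? (ans ++ [x]) x = some ans := by
  induction ans with
  | nil => simp
  | cons a t ih =>
      have hax : a ≠ x := by intro hh; exact h (hh ▸ List.mem_cons_self)
      have ht : x ∉ t := fun hm => h (List.mem_cons_of_mem _ hm)
      rw [List.cons_append, PySem.List.remove?_cons_of_ne _ hax, ih ht]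
      rfl

theorem pv_inner_eq (cs : List Char) (ans : List Int) (x : Int) (h : x ∉ ans) :
    pvInner cs (ans ++ [x]) x =
      if cs.any (fun c => !(c == '5' || c == '0')) then ans else ans ++ [x] := by
  induction cs with
  | nil => simp [pvInner]
  | cons c rest ih =>
      by_cases hc : (!(c == '5' || c == '0')) = true
      · have h1 : pvInner (c :: rest) (ans ++ [x]) x
            = (PySem.List.remove? (ans ++ [x]) x).getD (ans ++ [x]) := by
          simp [pvInner, hc]
        rw [h1, pv_remove_append ans x h]
        simp only [Option.getD_some, List.any_cons, hc, Bool.true_or, if_true]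
      · have hc' : (!(c == '5' || c == '0')) = false := by simpa using hc
        simp only [pvInner, List.any_cons, hc']
        simp only [Bool.false_eq_true, if_false, Bool.false_or]
        exact ih

theorem pv_body_eq (ans : List Int) (x : Int) (h : x ∉ ans) :
    (if PySem.Int.mod x 5 == 0 then
      let num := PySem.Int.toStr x
      if PySem.Str.isIn "5" num then pvInner num.toList (ans ++ [x]) x
      else ans
    else ans) = if pvP x then ans ++ [x] else ans := by
  unfold pvP
  simp only [PySem.Str.isIn_eq, PySem.Int.toList_toStr]
  have hinner := pv_inner_eq (PySem.Int.toChars x) ans x h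
  cases h5 : (PySem.Int.mod x 5 == 0) with
  | false => simp
  | true =>
    cases hin : PySem.Chars.isIn ['5'] (PySem.Int.toChars x) with
    | false => simp [hin]
    | true =>
      simp only [hinner, Bool.true_and, if_true]
      cases hb : ((PySem.Int.toChars x).any (fun c => !(c == '5' || c == '0'))) <;> simp

theorem pv_foldA (xs : List Int) (ans : List Int) (hnd : xs.Nodup)
    (h : ∀ i ∈ xs, i ∉ ans) :
    xs.foldl (fun ans i =>
      if PySem.Int.mod i 5 == 0 then
        let num := PySem.Int.toStr i
        if PySem.Str.isIn "5" num then pvInner num.toList (ans ++ [i]) i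
        else ans
      else ans) ans = ans ++ xs.filter pvP := by
  induction xs generalizing ans with
  | nil => simp
  | cons x t ih =>
      have hx : x ∉ ans := h x List.mem_cons_self
      have hnd' : t.Nodup := (List.nodup_cons.mp hnd).2
      have hxt : x ∉ t := (List.nodup_cons.mp hnd).1
      have h' : ∀ i ∈ t, i ∉ (if pvP x then ans ++ [x] else ans) := by
        intro i hi
        have hia : i ∉ ans := h i (List.mem_cons_of_mem _ hi)
        have hix : i ≠ x := fun hh => hxt (hh ▸ hi)
        by_cases hp : pvP x = true <;> simp [hp, hia, hix]
      rw [List.foldl_cons, pv_body_eq ans x hx]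
      rw [ih _ hnd' h']
      by_cases hp : pvP x = true <;> simp [hp]

theorem pv_solution_eq_filter (l r : Int) :
    solution l r =
      (if (PySem.List.pyRange l (r + 1) 1).filter pvP = [] then [-1]
       else (PySem.List.pyRange l (r + 1) 1).filter pvP) := by
  have hnd : (PySem.List.pyRange l (r + 1) 1).Nodup := PySem.List.nodup_pyRange_one _ _
  have := pv_foldA (PySem.List.pyRange l (r + 1) 1) [] hnd (by simp)
  simp only [solution, this, List.nil_append]

-- ---------- digit predicate facts ----------

theorem pv_toChars_pos (x : Int) (hx : 0 < x) :
    (PySem.Int.toStr x).toList = Nat.toDigits 10 x.toNat := by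
  rw [PySem.Int.toList_toStr]
  simp [PySem.Int.toChars, not_lt.mpr (le_of_lt hx)]

theorem pv_digits_ten (n : Nat) (h : 10 ≤ n) :
    Nat.toDigits 10 n = Nat.toDigits 10 (n / 10) ++ [(n % 10).digitChar] := by
  rw [Nat.toDigits_eq_if (by norm_num)]
  simp [Nat.not_lt.mpr h]

theorem pv_contains5 (n : Nat) (hn : 0 < n)
    (hd : ∀ c ∈ Nat.toDigits 10 n, c = '0' ∨ c = '5') :
    '5' ∈ Nat.toDigits 10 n := by
  induction n using Nat.strong_induction_on with
  | _ n ih =>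
      by_cases hlt : n < 10
      · rw [Nat.toDigits_of_lt_base hlt] at hd ⊢
        have := hd _ List.mem_cons_self
        interval_cases n <;> revert this <;> decide
      · push_neg at hlt
        rw [pv_digits_ten n hlt] at hd ⊢
        refine List.mem_append_left _ (ih (n / 10) (Nat.div_lt_self hn (by norm_num))
          (Nat.div_pos hlt (by norm_num)) ?_)
        intro c hc; exact hd c (List.mem_append_left _ hc)

theorem pv_dvd5 (n : Nat) (hd : ∀ c ∈ Nat.toDigits 10 n, c = '0' ∨ c = '5') :
    5 ∣ n := by
  induction n using Nat.strong_induction_on with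
  | _ n ih =>
      by_cases hlt : n < 10
      · rw [Nat.toDigits_of_lt_base hlt] at hd
        have := hd _ List.mem_cons_self
        interval_cases n <;> revert this <;> decide
      · push_neg at hlt
        rw [pv_digits_ten n hlt] at hd
        have h10 : 5 ∣ n / 10 := ih (n / 10) (Nat.div_lt_self (by omega) (by norm_num)) ?_
        · have hlast := hd _ (List.mem_append_right _ List.mem_cons_self)
          have hm : n % 10 < 10 := Nat.mod_lt _ (by norm_num)
          have h5 : 5 ∣ n % 10 := by
            have hm10 : n % 10 < 10 := hm
            interval_cases h : (n % 10) <;> revert hlast <;> decide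
          omega
        · intro c hc; exact hd c (List.mem_append_left _ hc)

theorem pv_bad_mem {cs : List Char} {c : Char} (hc : c ∈ cs)
    (hb : (!(c == '5' || c == '0')) = true) :
    (cs.any (fun c => !(c == '5' || c == '0'))) = true := by
  exact List.any_eq_true.mpr ⟨c, hc, hb⟩

theorem pv_P_iff_Q (x : Int) : pvP x = true ↔ pvQ x := by
  rcases lt_trichotomy x 0 with hx | hx | hx
  · constructor
    · intro hP
      exfalso
      have hneg : (PySem.Int.toStr x).toList = '-' :: Nat.toDigits 10 x.natAbs := by
        rw [PySem.Int.toList_toStr]; simp [PySem.Int.toChars, hx]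
      have hb := pv_bad_mem (cs := (PySem.Int.toStr x).toList) (c := '-')
        (by rw [hneg]; exact List.mem_cons_self) (by decide)
      simp only [pvP, Bool.and_eq_true, Bool.not_eq_true'] at hP
      rw [hP.2] at hb
      exact Bool.false_ne_true hb
    · rintro ⟨h0, -⟩; omega
  · subst hx
    constructor
    · intro hP; exact absurd hP (by decide)
    · rintro ⟨h0, -⟩; omega
  · have hchars : (PySem.Int.toStr x).toList = Nat.toDigits 10 x.toNat :=
      pv_toChars_pos x hx
    constructor
    · intro hP
      simp only [pvP, Bool.and_eq_true, Bool.not_eq_true'] at hP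
      refine ⟨hx, ?_⟩
      intro c hc
      have : (!(c == '5' || c == '0')) = false := by
        cases hbc : (!(c == '5' || c == '0')) with
        | false => rfl
        | true =>
            have := pv_bad_mem (cs := (PySem.Int.toStr x).toList)
              (by rw [hchars]; exact hc) hbc
            rw [hP.2] at this
            exact absurd this Bool.false_ne_true
      have h2 : ¬c = '5' → c = '0' := by simpa using this
      by_cases h5 : c = '5'
      · exact Or.inr h5
      · exact Or.inl (h2 h5)
    · rintro ⟨-, hd⟩
      have hdvd : 5 ∣ x := by
        have h1 : (5 : Nat) ∣ x.toNat := pv_dvd5 x.toNat hd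
        have h2 : x = (x.toNat : Int) := by omega
        rw [h2]; exact_mod_cast Int.natCast_dvd_natCast.mpr h1
      have hmem : '5' ∈ (PySem.Int.toStr x).toList := by
        rw [hchars]
        exact pv_contains5 x.toNat (by omega) hd
      have hisin : PySem.Str.isIn "5" (PySem.Int.toStr x) = true := by
        rw [PySem.Str.isIn_eq]
        exact (PySem.Chars.isIn_iff_infix _ _).mpr (by
          simpa using (List.singleton_infix_iff '5' _).mpr (by
            rw [PySem.Int.toList_toStr] at hmem; exact hmem))
      have hany : ((PySem.Int.toStr x).toList.any (fun c => !(c == '5' || c == '0'))) = false := by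
        rw [Bool.eq_false_iff]
        intro hb
        obtain ⟨c, hc, hbc⟩ := List.any_eq_true.mp hb
        rw [hchars] at hc
        rcases hd c hc with h | h <;> subst h <;> simp at hbc
      simp only [pvP, Bool.and_eq_true, Bool.not_eq_true']
      refine ⟨⟨?_, hisin⟩, hany⟩
      rw [beq_iff_eq, PySem.Int.mod_eq_zero_iff_dvd]
      exact hdvd

-- ---------- level facts ----------

theorem pv_Q_step (v : Int) (d : Nat) (hv : 0 < v) (hd : d = 0 ∨ d = 5) :
    (pvQ (10 * v + (d : Int)) ↔ pvQ v) := by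
  have hkey : Nat.toDigits 10 (10 * v + (d : Int)).toNat
      = Nat.toDigits 10 v.toNat ++ [Nat.digitChar d] := by
    have h1 : (10 * v + (d : Int)).toNat = 10 * v.toNat + d := by omega
    have hd10 : d < 10 := by rcases hd with h | h <;> omega
    have h2 : Nat.toDigits 10 v.toNat ++ Nat.toDigits 10 d
        = Nat.toDigits 10 (10 * v.toNat + d) :=
      Nat.toDigits_append_toDigits (by norm_num) (by omega) hd10
    have h3 : Nat.toDigits 10 d = [Nat.digitChar d] := Nat.toDigits_of_lt_base hd10
    rw [h1, ← h2, h3]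
  constructor
  · rintro ⟨-, hall⟩
    refine ⟨hv, fun c hc => ?_⟩
    exact hall c (by rw [hkey]; exact List.mem_append_left _ hc)
  · rintro ⟨-, hall⟩
    refine ⟨by omega, fun c hc => ?_⟩
    rw [hkey] at hc
    rcases List.mem_append.mp hc with h | h
    · exact hall c h
    · have hcd : c = Nat.digitChar d := by simpa using h
      subst hcd
      rcases hd with h5 | h5 <;> subst h5 <;> decide

theorem pv_mem_levels (k : Nat) (x : Int) :
    x ∈ pvLevels k ↔ pvP x = true ∧ (10 : Int) ^ k ≤ x ∧ x < (10 : Int) ^ (k + 1) := by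
  induction k generalizing x with
  | zero =>
      constructor
      · intro hx
        have : x = 5 := by simpa [pvLevels] using hx
        subst this
        exact ⟨by decide, by norm_num, by norm_num⟩
      · rintro ⟨hP, h1, h2⟩
        norm_num at h1 h2
        have : x = 5 := by interval_cases x <;> revert hP <;> decide
        simp [pvLevels, this]
  | succ k ih =>
      have hpow : (0:Int) < 10 ^ k := by positivity
      constructor
      · intro hx
        simp only [pvLevels, pvNext, List.mem_flatMap] at hx
        obtain ⟨v, hv, hmem⟩ := hx
        obtain ⟨hPv, hb1, hb2⟩ := (ih v).mp hv
        have hQv := (pv_P_iff_Q v).mp hPv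
        have hv0 : 0 < v := hQv.1
        have hx' : ∃ d : Nat, (d = 0 ∨ d = 5) ∧ x = 10 * v + (d : Int) := by
          simp only [List.mem_cons] at hmem
          rcases hmem with h | h | h
          · exact ⟨0, Or.inl rfl, by omega⟩
          · exact ⟨5, Or.inr rfl, by push_cast; omega⟩
          · simp at h
        obtain ⟨d, hd, hxe⟩ := hx'
        have hQx : pvQ x := by
          rw [hxe]; exact (pv_Q_step v d hv0 hd).mpr hQv
        refine ⟨(pv_P_iff_Q x).mpr hQx, ?_, ?_⟩
        · have : (10:Int) ^ (k+1) = 10 * 10 ^ k := by ring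
          rw [this]
          have hd' : (0:Int) ≤ (d:Int) := by positivity
          omega
        · have h1 : (10:Int) ^ (k+1+1) = 10 * 10 ^ (k+1) := by ring
          have hd' : (d:Int) ≤ 5 := by rcases hd with h | h <;> simp [h]
          omega
      · rintro ⟨hP, h1, h2⟩
        have hQx := (pv_P_iff_Q x).mp hP
        have hx0 : 0 < x := hQx.1
        have hx10 : (10:Int) ≤ x := by
          have : (10:Int) ≤ 10 ^ (k+1) := by
            calc (10:Int) = 10 ^ 1 := by norm_num
            _ ≤ 10 ^ (k+1) := by apply pow_le_pow_right₀ <;> omega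
          omega
        set n := x.toNat with hn
        have hn10 : 10 ≤ n := by omega
        have hsplit := pv_digits_ten n hn10
        have hv0 : 0 < (n / 10 : Nat) := Nat.div_pos hn10 (by norm_num)
        have hdig : ∀ c ∈ Nat.toDigits 10 n, c = '0' ∨ c = '5' := hQx.2
        have hlast : Nat.digitChar (n % 10) = '0' ∨ Nat.digitChar (n % 10) = '5' := by
          apply hdig
          rw [hsplit]
          exact List.mem_append_right _ List.mem_cons_self
        have hm : n % 10 < 10 := Nat.mod_lt _ (by norm_num)
        have hd5 : n % 10 = 0 ∨ n % 10 = 5 := by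
          interval_cases h : (n % 10) <;> revert hlast <;> decide
        have hQv : pvQ ((n / 10 : Nat) : Int) := by
          refine ⟨by exact_mod_cast hv0, fun c hc => ?_⟩
          apply hdig
          rw [hsplit]
          apply List.mem_append_left
          simpa using hc
        have hvmem : ((n / 10 : Nat) : Int) ∈ pvLevels k := by
          apply (ih _).mpr
          refine ⟨(pv_P_iff_Q _).mpr hQv, ?_, ?_⟩
          · have c2 : (((10:Nat) ^ k : Nat) : Int) = (10:Int) ^ k := by push_cast; ring
            have c1 : (((10:Nat) ^ (k+1) : Nat) : Int) = (10:Int) ^ (k+1) := by push_cast; ring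
            have hn1 : (10:Nat) ^ (k+1) ≤ n := by omega
            have e1 : (10:Nat) ^ (k+1) = 10 * 10 ^ k := by ring
            have hq : (10:Nat) ^ k ≤ n / 10 := by omega
            omega
          · have c3 : (((10:Nat) ^ (k+1+1) : Nat) : Int) = (10:Int) ^ (k+1+1) := by push_cast; ring
            have c1 : (((10:Nat) ^ (k+1) : Nat) : Int) = (10:Int) ^ (k+1) := by push_cast; ring
            have hn2 : n < (10:Nat) ^ (k+1+1) := by omega
            have e2 : (10:Nat) ^ (k+1+1) = 10 * 10 ^ (k+1) := by ring
            have hq : n / 10 < (10:Nat) ^ (k+1) := by omega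
            omega
        simp only [pvLevels, pvNext, List.mem_flatMap]
        refine ⟨((n / 10 : Nat) : Int), hvmem, ?_⟩
        have hxn : x = ((10 * (n / 10) + n % 10 : Nat) : Int) := by
          have : n = 10 * (n / 10) + n % 10 := (Nat.div_add_mod n 10).symm ▸ by omega
          omega
        rcases hd5 with h | h
        · have hx5 : x = 10 * ((n / 10 : Nat) : Int) + 0 := by
            rw [hxn]; push_cast [h]; ring
          rw [hx5]; exact List.mem_cons_self
        · have hx5 : x = 10 * ((n / 10 : Nat) : Int) + 5 := by
            rw [hxn]; push_cast [h]; ring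
          rw [hx5]; exact List.mem_cons_of_mem _ List.mem_cons_self

theorem pv_levels_pos (k : Nat) : ∀ x ∈ pvLevels k, 0 < x := by
  intro x hx
  exact ((pv_P_iff_Q x).mp ((pv_mem_levels k x).mp hx).1).1

theorem pv_levels_pairwise (k : Nat) : (pvLevels k).Pairwise (· < ·) := by
  induction k with
  | zero => simp [pvLevels]
  | succ k ih =>
      simp only [pvLevels, pvNext]
      rw [List.pairwise_flatMap]
      constructor
      · intro v hv
        simp
      · refine ih.imp_of_mem ?_
        intro a b ha hb hab
        have ha0 := pv_levels_pos k a ha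
        intro y hy z hz
        simp only [List.mem_cons] at hy hz
        have hy' : y = 10 * a + 0 ∨ y = 10 * a + 5 := by simpa using hy
        have hz' : z = 10 * b + 0 ∨ z = 10 * b + 5 := by simpa using hz
        rcases hy' with h | h <;> rcases hz' with h2 | h2 <;> subst h <;> subst h2 <;> omega

-- ---------- B's fold ----------

theorem pv_foldB (l r : Int) (m : Nat) (j : Nat) (acc : List Int) :
    (List.range m).foldl
      (fun (p : List Int × List Int) _ =>
        (p.1 ++ p.2.filter (fun v => decide (l ≤ v) && decide (v ≤ r)),
         p.2.flatMap (fun v => [10 * v + 0, 10 * v + 5])))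
      (acc, pvLevels j)
    = (acc ++ (List.range m).flatMap
        (fun t => (pvLevels (j + t)).filter (fun v => decide (l ≤ v) && decide (v ≤ r))),
       pvLevels (j + m)) := by
  induction m with
  | zero => simp
  | succ m ih =>
      rw [List.range_succ, List.foldl_append, ih, List.foldl_cons, List.foldl_nil]
      refine Prod.ext ?_ ?_
      · simp [List.flatMap_append, List.append_assoc]
      · show pvNext (pvLevels (j + m)) = pvLevels (j + (m + 1))
        rw [show j + (m + 1) = (j + m) + 1 by omega]
        rfl

-- ---------- final assembly ----------

-- digit-length window: every x with pvP x and x ≤ r lies in a level below len(str(r))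
theorem pv_exists_level (x r : Int) (hP : pvP x = true) (hxr : x ≤ r) :
    ∃ t < (PySem.Str.len (PySem.Int.toStr r)).toNat,
      (10 : Int) ^ t ≤ x ∧ x < (10 : Int) ^ (t + 1) := by
  have hQ := (pv_P_iff_Q x).mp hP
  have hx0 : 0 < x := hQ.1
  have hr0 : 0 < r := by omega
  set L := (Nat.toDigits 10 x.toNat).length with hL
  have hLpos : 0 < L := Nat.length_toDigits_pos
  have hup : x.toNat < 10 ^ L :=
    (Nat.length_toDigits_le_iff (by norm_num) hLpos).mp (le_refl L)
  have hlow : 10 ^ (L - 1) ≤ x.toNat := by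
    rcases Nat.eq_or_lt_of_le hLpos with h1 | h1
    · simp [← h1]; omega
    · by_contra hc
      push_neg at hc
      have := (Nat.length_toDigits_le_iff (b := 10) (n := x.toNat) (by norm_num) (by omega)).mpr hc
      omega
  have hd : (PySem.Str.len (PySem.Int.toStr r)).toNat = (Nat.toDigits 10 r.toNat).length := by
    have h1 : (PySem.Int.toStr r).toList = Nat.toDigits 10 r.toNat := pv_toChars_pos r hr0
    have h2 : PySem.Str.len (PySem.Int.toStr r) = ((PySem.Int.toStr r).toList.length : Int) := by
      simp
    rw [h2, h1]
    omega
  have hLd : L ≤ (Nat.toDigits 10 r.toNat).length := by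
    set Lr := (Nat.toDigits 10 r.toNat).length with hLr
    have hLrpos : 0 < Lr := Nat.length_toDigits_pos
    by_contra hc
    push_neg at hc
    have hrup : r.toNat < 10 ^ Lr :=
      (Nat.length_toDigits_le_iff (by norm_num) hLrpos).mp (le_refl Lr)
    have hmono : (10:Nat) ^ Lr ≤ 10 ^ (L - 1) := Nat.pow_le_pow_right (by norm_num) (by omega)
    omega
  refine ⟨L - 1, by omega, ?_, ?_⟩
  · have : ((10:Nat) ^ (L-1) : Int) ≤ (x.toNat : Int) := by exact_mod_cast hlow
    push_cast at this
    omega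
  · have hL1 : L - 1 + 1 = L := by omega
    rw [hL1]
    have : ((x.toNat : Int)) < ((10:Nat) ^ L : Int) := by exact_mod_cast hup
    push_cast at this
    omega

theorem pv_lists_eq (l r : Int) :
    (PySem.List.pyRange l (r + 1) 1).filter pvP
      = (List.range (PySem.Str.len (PySem.Int.toStr r)).toNat).flatMap
          (fun t => (pvLevels t).filter (fun v => decide (l ≤ v) && decide (v ≤ r))) := by
  set d := (PySem.Str.len (PySem.Int.toStr r)).toNat with hd
  have hpw1 : ((PySem.List.pyRange l (r + 1) 1).filter pvP).Pairwise (· < ·) :=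
    (PySem.List.pairwise_lt_pyRange_one l (r+1)).filter _
  have hpw2 : ((List.range d).flatMap
      (fun t => (pvLevels t).filter (fun v => decide (l ≤ v) && decide (v ≤ r)))).Pairwise (· < ·) := by
    rw [List.pairwise_flatMap]
    constructor
    · intro t _
      exact (pv_levels_pairwise t).filter _
    · refine (List.pairwise_lt_range).imp_of_mem ?_
      intro a b _ _ hab y hy z hz
      have hy' := (pv_mem_levels a y).mp (List.mem_of_mem_filter hy)
      have hz' := (pv_mem_levels b z).mp (List.mem_of_mem_filter hz)
      have h1 : (10:Int) ^ (a+1) ≤ 10 ^ b := by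
        apply pow_le_pow_right₀ (by norm_num)
        omega
      have := hy'.2.2
      have := hz'.2.1
      omega
  have hmem : ∀ x, (x ∈ (PySem.List.pyRange l (r + 1) 1).filter pvP) ↔
      (x ∈ (List.range d).flatMap
        (fun t => (pvLevels t).filter (fun v => decide (l ≤ v) && decide (v ≤ r)))) := by
    intro x
    rw [List.mem_filter, PySem.List.mem_pyRange_one, List.mem_flatMap]
    constructor
    · rintro ⟨⟨hlx, hxr⟩, hP⟩
      have hxr' : x ≤ r := by omega
      obtain ⟨t, htd, hb1, hb2⟩ := pv_exists_level x r hP hxr'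
      refine ⟨t, List.mem_range.mpr htd, ?_⟩
      rw [List.mem_filter]
      exact ⟨(pv_mem_levels t x).mpr ⟨hP, hb1, hb2⟩, by simp [hlx, hxr']⟩
    · rintro ⟨t, htm, hx⟩
      rw [List.mem_filter] at hx
      obtain ⟨hxl, hrange⟩ := hx
      have h1 := (pv_mem_levels t x).mp hxl
      simp only [Bool.and_eq_true, decide_eq_true_eq] at hrange
      exact ⟨⟨hrange.1, by omega⟩, h1.1⟩
  have hnd1 : ((PySem.List.pyRange l (r + 1) 1).filter pvP).Nodup := hpw1.nodup
  have hnd2 : ((List.range d).flatMap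
      (fun t => (pvLevels t).filter (fun v => decide (l ≤ v) && decide (v ≤ r)))).Nodup := hpw2.nodup
  have hperm := (List.perm_ext_iff_of_nodup hnd1 hnd2).mpr hmem
  exact List.eq_of_perm_of_sorted (fun a b _ _ h1 h2 => absurd h2 (by omega)) hpw1 hpw2 hperm

-- ===== VERDICT (by name: the statement is the Claim_ definition above) =====
theorem solution_spec : Claim_equal_solution := by
  intro l r _
  unfold Spec_solution
  rw [pv_solution_eq_filter, pv_lists_eq]
  have h := pv_foldB l r (PySem.Str.len (PySem.Int.toStr r)).toNat 0 []
  simp only [Nat.zero_add, List.nil_append, pvLevels] at h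
  simp only [solution_alt, h]
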